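-- pv_equiv track=rewrite | github.com/GundalaNikhil/DSA | dsa-problems/Bitwise/testcases/generate_all_testcases.py | bit009_smallest_absent_xor
-- ===== SOURCE A (Python) =====
-- from typing import List, Dict, Any
--
-- def bit009_smallest_absent_xor(a: List[int]) -> int:
--     """BIT-009: Smallest Absent XOR - Linear Basis"""
--     basis = [0] * 30
--     for x in a:
--         cur = x
--         for i in range(29, -1, -1):
--             if not (cur & (1 << i)):
--                 continue
--             if basis[i] == 0:
--                 basis[i] = cur
--                 break
--             cur ^= basis[i]
--
--     # Find smallest missing power of 2
--     for i in range(30):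
--         if basis[i] == 0:
--             return 1 << i
--     return 1 << 30
-- ===== SOURCE B (Python) =====
-- def bit009_smallest_absent_xor(a):
--     """BIT-009: column-driven Gaussian elimination (bits 0..29 only)."""
--     rows = [x & ((1 << 30) - 1) for x in a]
--     pivot = [False] * 30
--     for i in range(29, -1, -1):
--         p = 0
--         for r in rows:
--             if (r >> i) & 1:
--                 p = r
--                 break
--         if p:
--             pivot[i] = True
--             rows = [r ^ p if (r >> i) & 1 else r for r in rows]
--     for i in range(30):
--         if not pivot[i]:
--             return 1 << i
--     return 1 << 30
-- ===== Notes on version B (the rewrite author's own statement) =====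
-- stated objective: alternative
-- what changed: A inserts each element into a leading-bit-indexed XOR basis array (element-driven insertion with per-bit reduce/break); B instead masks all values to bits 0..29 and runs column-driven Gaussian elimination: for each bit 29..0 it finds one row with that bit set, marks the bit as a pivot and XORs that row into every other row with the bit set, finally returning 1 << (smallest non-pivot bit).
import Mathlib
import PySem

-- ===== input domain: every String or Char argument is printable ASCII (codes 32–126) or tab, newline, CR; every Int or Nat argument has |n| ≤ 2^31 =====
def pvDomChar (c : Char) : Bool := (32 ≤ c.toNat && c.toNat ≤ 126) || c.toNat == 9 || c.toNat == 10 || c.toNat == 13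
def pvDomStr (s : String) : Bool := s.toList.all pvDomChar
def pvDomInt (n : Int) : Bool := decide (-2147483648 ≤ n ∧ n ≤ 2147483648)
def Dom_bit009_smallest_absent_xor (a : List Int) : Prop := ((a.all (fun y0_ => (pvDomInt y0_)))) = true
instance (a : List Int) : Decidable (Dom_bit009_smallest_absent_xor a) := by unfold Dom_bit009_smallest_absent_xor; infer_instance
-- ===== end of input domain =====

-- B computes the same answer by column-driven Gaussian elimination over the row list
-- (one pivot search and row-cleanup pass per bit 29..0) instead of A's per-element basis
-- insertion; an alternative algorithm of similar cost, not claimed faster.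

-- ===== PORT A =====
-- inner loop of A: 'for i in range(29, -1, -1)' with continue/break; fuel = i+1
def pvInnerA : List Int → Int → Nat → List Int
  | basis, _, 0 => basis
  | basis, cur, i+1 =>
    if PySem.Int.band cur ((1:Int) <<< i) = 0 then pvInnerA basis cur i
    else if basis.getD i 0 = 0 then basis.set i cur
    else pvInnerA basis (PySem.Int.bxor cur (basis.getD i 0)) i


-- final scan of A: 'for i in range(30): if basis[i] == 0: return 1 << i'; falls through to 1 << 30
def pvScanA : List Int → Nat → Nat → Int
  | _, _, 0 => (1:Int) <<< (30:Nat)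
  | basis, i, fuel+1 => if basis.getD i 0 = 0 then (1:Int) <<< i else pvScanA basis (i+1) fuel


def bit009_smallest_absent_xor (a : List Int) : Int :=
  pvScanA (a.foldl (fun basis x => pvInnerA basis x 30) (List.replicate 30 (0:Int))) 0 30


-- ===== PORT B =====
-- 'p = 0; for r in rows: if (r >> i) & 1: p = r; break'
def pvFindB : List Int → Nat → Int
  | [], _ => 0
  | r :: rest, i => if PySem.Int.band (r >>> i) 1 ≠ 0 then r else pvFindB rest i


-- 'for i in range(29, -1, -1)' of Source B; fuel = i+1
def pvElimB : List Int → List Bool → Nat → List Int × List Bool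
  | rows, pivot, 0 => (rows, pivot)
  | rows, pivot, i+1 =>
    let p := pvFindB rows i
    if p ≠ 0 then
      pvElimB (rows.map fun (r : Int) => if PySem.Int.band (r >>> i) 1 ≠ 0 then PySem.Int.bxor r p else r)
        (pivot.set i true) i
    else pvElimB rows pivot i


-- 'for i in range(30): if not pivot[i]: return 1 << i'; falls through to 1 << 30
def pvScanB : List Bool → Nat → Nat → Int
  | _, _, 0 => (1:Int) <<< (30:Nat)
  | pivot, i, fuel+1 => if pivot.getD i false = false then (1:Int) <<< i else pvScanB pivot (i+1) fuel


def bit009_smallest_absent_xor_alt (a : List Int) : Int :=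
  let rows := a.map (fun x => PySem.Int.band x (((1:Int) <<< (30:Nat)) - 1))
  pvScanB (pvElimB rows (List.replicate 30 false) 30).2 0 30

-- ===== simulation of port B by the Nat-level elimination =====


-- ===== PRECONDITION & SPEC =====
def Spec_bit009_smallest_absent_xor (a : List Int) (out : Int) : Prop := out = bit009_smallest_absent_xor_alt a
instance (a : List Int) (out : Int) : Decidable (Spec_bit009_smallest_absent_xor a out) := by unfold Spec_bit009_smallest_absent_xor; infer_instance

-- ===== CLAIM (what is proved, stated in full; the proofs are below) =====
def Claim_equal_bit009_smallest_absent_xor : Prop := ∀ (a : List Int), Dom_bit009_smallest_absent_xor a → Spec_bit009_smallest_absent_xor a (bit009_smallest_absent_xor a)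

-- ===== LEMMAS AND PROOFS =====
theorem pv_ldiff_zero_left (n : Nat) : Nat.ldiff 0 n = 0 := by
  apply Nat.eq_of_testBit_eq; intro i; simp [Nat.testBit_ldiff]
theorem pv_ldiff_zero_right (m : Nat) : Nat.ldiff m 0 = m := by
  apply Nat.eq_of_testBit_eq; intro i; simp [Nat.testBit_ldiff]
theorem pv_and_add_ldiff (m n : Nat) : (m &&& n) + m.ldiff n = m := by
  induction m using Nat.binaryRec generalizing n with
  | zero => simp [Nat.zero_and, pv_ldiff_zero_left]
  | bit b m ih =>
    induction n using Nat.binaryRec with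
    | zero => simp [Nat.and_zero, pv_ldiff_zero_right]
    | bit c n _ =>
      rw [Nat.land_bit, Nat.ldiff_bit, Nat.bit_val, Nat.bit_val, Nat.bit_val]
      have := ih n
      cases b <;> cases c <;> simp at * <;> omega
theorem pv_band_eq_land (a b : Int) : PySem.Int.band a b = Int.land a b := by
  rcases a with m | m <;> rcases b with n | n <;>
    simp [PySem.Int.band, Int.land, Int.negSucc_eq] <;> try omega
  · rw [if_neg (by omega)]; have h := pv_and_add_ldiff m n; omega
  · rw [if_neg (by omega)]; have h := pv_and_add_ldiff n m; omega
theorem pv_bxor_eq_xor (a b : Int) : PySem.Int.bxor a b = Int.xor a b := by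
  rcases a with m | m <;> rcases b with n | n <;>
    simp [PySem.Int.bxor, Int.xor, Int.negSucc_eq] <;> omega

def pvMu (x : Int) : Nat := (Int.land x ((2:Int)^30 - 1)).toNat

theorem pv_mask_cast : ((2:Int)^30 - 1) = ((2^30 - 1 : Nat) : Int) := by norm_num

theorem pv_land_ofNat (k m : Nat) : Int.land (Int.ofNat k) ((m : Nat) : Int) = Int.ofNat (k &&& m) := rfl
theorem pv_land_negSucc (k m : Nat) : Int.land (Int.negSucc k) ((m : Nat) : Int) = Int.ofNat (m.ldiff k) := rfl

theorem pv_mu_testBit (x : Int) (j : Nat) : (pvMu x).testBit j = (x.testBit j && decide (j < 30)) := by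
  unfold pvMu; rw [pv_mask_cast]
  rcases x with k | k
  · rw [pv_land_ofNat]
    show (k &&& (2^30-1)).testBit j = _
    rw [Nat.testBit_and, Nat.testBit_two_pow_sub_one]
    rfl
  · rw [pv_land_negSucc]
    show ((2^30-1 : Nat).ldiff k).testBit j = _
    rw [Nat.testBit_ldiff, Nat.testBit_two_pow_sub_one]
    show _ = ((!k.testBit j) && _)
    cases k.testBit j <;> cases h : (decide (j < 30)) <;> simp

theorem pv_mu_xor (u v : Int) : pvMu (PySem.Int.bxor u v) = pvMu u ^^^ pvMu v := by
  apply Nat.eq_of_testBit_eq; intro j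
  rw [Nat.testBit_xor, pv_mu_testBit, pv_mu_testBit, pv_mu_testBit, pv_bxor_eq_xor, Int.testBit_lxor]
  cases u.testBit j <;> cases v.testBit j <;> cases h : (decide (j < 30)) <;> rfl

theorem pv_mu_high (x : Int) (j : Nat) (h : 30 ≤ j) : (pvMu x).testBit j = false := by
  rw [pv_mu_testBit]; simp [Nat.not_lt.mpr h]

theorem pv_mu_zero : pvMu 0 = 0 := by decide

theorem pv_one_shl (i : Nat) : ((1:Int) <<< i) = ((2^i : Nat) : Int) := by
  show Int.ofNat (1 <<< i) = _
  rw [Nat.shiftLeft_eq, Nat.one_mul]; rfl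

theorem pv_land_two_pow (x : Int) (i : Nat) : (Int.land x ((2^i : Nat) : Int) = 0) ↔ x.testBit i = false := by
  rcases x with k | k
  · rw [pv_land_ofNat]
    show ((k &&& 2^i : Nat) : Int) = 0 ↔ _
    rw [Int.natCast_eq_zero, Nat.and_two_pow]
    have hc : ((k:Int)).testBit i = k.testBit i := rfl
    cases h : k.testBit i
    · simp [hc, h]
    · simp [hc, h]
  · rw [pv_land_negSucc]
    show ((Nat.ldiff (2^i) k : Nat) : Int) = 0 ↔ (!k.testBit i) = false
    rw [Int.natCast_eq_zero]
    constructor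
    · intro h0
      have := congrArg (fun t => t.testBit i) h0
      simp [Nat.testBit_ldiff] at this
      simp [this]
    · intro hk
      apply Nat.eq_of_testBit_eq; intro j
      rw [Nat.testBit_ldiff, Nat.testBit_two_pow, Nat.zero_testBit]
      rcases eq_or_ne i j with rfl | hne
      · simp at hk; simp [hk]
      · simp [hne]

theorem pv_guard_A (x : Int) (i : Nat) : (PySem.Int.band x ((1:Int) <<< i) = 0) ↔ x.testBit i = false := by
  rw [pv_band_eq_land, pv_one_shl, pv_land_two_pow]

theorem pv_cast_shr (n i : Nat) : ((n : Int) >>> i) = ((n >>> i : Nat) : Int) := rfl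

theorem pv_guard_B (n i : Nat) : (PySem.Int.band ((n : Int) >>> i) 1 = 0) ↔ n.testBit i = false := by
  rw [pv_cast_shr, show (1:Int) = ((1:Nat) : Int) from rfl, PySem.Int.band_natCast, Int.natCast_eq_zero]
  show (n >>> i) &&& 1 = 0 ↔ _
  rw [Nat.and_comm]
  unfold Nat.testBit
  cases h : (1 &&& (n >>> i)) <;> simp [h]

theorem pv_land_mask_nonneg (x : Int) : 0 ≤ Int.land x ((2:Int)^30 - 1) := by
  rw [pv_mask_cast]
  rcases x with k | k
  · rw [pv_land_ofNat]; exact Int.natCast_nonneg _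
  · rw [pv_land_negSucc]; exact Int.natCast_nonneg _

theorem pv_mask_eq (x : Int) : PySem.Int.band x (((1:Int) <<< (30:Nat)) - 1) = ((pvMu x : Nat) : Int) := by
  rw [pv_band_eq_land, show ((1:Int) <<< (30:Nat)) - 1 = (2:Int)^30 - 1 by decide]
  unfold pvMu
  rw [Int.toNat_of_nonneg (pv_land_mask_nonneg x)]

def pvPick : List Bool → List Nat → Nat
  | c :: cs, x :: xs => (if c then x else 0) ^^^ pvPick cs xs
  | _, _ => 0

def pvInSpan (l : List Nat) (v : Nat) : Prop := ∃ c, pvPick c l = v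

def pvIsLead (v : Nat) (i : Nat) : Prop := v.testBit i = true ∧ ∀ j, i < j → v.testBit j = false

def pvPivot (L : List Nat) (i : Nat) : Prop := ∃ v, pvInSpan L v ∧ pvIsLead v i

theorem pv_pick_nil (c : List Bool) : pvPick c [] = 0 := by cases c <;> rfl

theorem pv_span_zero (l : List Nat) : pvInSpan l 0 := ⟨[], by cases l <;> rfl⟩

theorem pv_span_mem {l : List Nat} {x : Nat} (h : x ∈ l) : pvInSpan l x := by
  induction l with
  | nil => cases h
  | cons y ys ih =>
    rcases List.mem_cons.mp h with rfl | h'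
    · exact ⟨[true], by simp [pvPick, pv_pick_nil]⟩
    · obtain ⟨c, hc⟩ := ih h'
      exact ⟨false :: c, by simp [pvPick, hc]⟩

def pvMerge : List Bool → List Bool → List Bool
  | [], d => d
  | c, [] => c
  | cb :: cs, db :: ds => (xor cb db) :: pvMerge cs ds

theorem pv_pick_merge (l : List Nat) : ∀ c d, pvPick (pvMerge c d) l = pvPick c l ^^^ pvPick d l := by
  induction l with
  | nil => intro c d; simp [pv_pick_nil]
  | cons x xs ih =>
    intro c d
    match c, d with
    | [], d =>
      show pvPick d (x :: xs) = pvPick [] (x :: xs) ^^^ pvPick d (x :: xs)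
      rw [show pvPick [] (x :: xs) = 0 from rfl, Nat.zero_xor]
    | cb :: cs, [] =>
      show pvPick (cb :: cs) (x :: xs) = pvPick (cb :: cs) (x :: xs) ^^^ pvPick [] (x :: xs)
      rw [show pvPick [] (x :: xs) = 0 from rfl, Nat.xor_zero]
    | cb :: cs, db :: ds =>
      show pvPick ((xor cb db) :: pvMerge cs ds) (x :: xs) = _
      simp only [pvPick, ih]
      cases cb <;> cases db <;> simp [Nat.xor_assoc, Nat.xor_comm, Nat.xor_left_comm]

theorem pv_span_xor {l : List Nat} {u v : Nat} (hu : pvInSpan l u) (hv : pvInSpan l v) :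
    pvInSpan l (u ^^^ v) := by
  obtain ⟨c, hc⟩ := hu; obtain ⟨d, hd⟩ := hv
  exact ⟨pvMerge c d, by rw [pv_pick_merge, hc, hd]⟩

theorem pv_span_of_forall_mem {m l : List Nat} (h : ∀ x ∈ m, pvInSpan l x) {v : Nat}
    (hv : pvInSpan m v) : pvInSpan l v := by
  obtain ⟨c, hc⟩ := hv
  induction m generalizing c v with
  | nil => rw [pv_pick_nil] at hc; exact hc ▸ pv_span_zero l
  | cons x xs ih =>
    match c with
    | [] => exact hc ▸ pv_span_zero l
    | cb :: cs =>
      have hx : pvInSpan l (if cb then x else 0) := by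
        cases cb <;> simp [pv_span_zero, h x (List.mem_cons_self)]
      have hrest : pvInSpan l (pvPick cs xs) :=
        ih (fun y hy => h y (List.mem_cons_of_mem _ hy)) cs rfl
      rw [← hc]
      exact pv_span_xor hx hrest

theorem pv_span_cons {y : Nat} {l : List Nat} {v : Nat} :
    pvInSpan (y :: l) v ↔ pvInSpan l v ∨ pvInSpan l (v ^^^ y) := by
  constructor
  · rintro ⟨c, hc⟩
    match c with
    | [] => exact Or.inl (hc ▸ pv_span_zero l)
    | cb :: cs =>
      cases cb
      · simp only [pvPick, if_neg Bool.false_ne_true] at hc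
        simp only [Nat.zero_xor] at hc
        exact Or.inl ⟨cs, hc⟩
      · simp only [pvPick, if_true] at hc
        refine Or.inr ⟨cs, ?_⟩
        rw [← hc]
        simp [Nat.xor_comm, Nat.xor_left_comm, Nat.xor_assoc]
  · rintro (⟨c, hc⟩ | ⟨c, hc⟩)
    · exact ⟨false :: c, by simp [pvPick, hc]⟩
    · refine ⟨true :: c, ?_⟩
      simp only [pvPick, if_true, hc]
      simp [Nat.xor_comm, Nat.xor_left_comm, Nat.xor_assoc]

theorem pv_span_extend {y : Nat} {l : List Nat} {v : Nat} (h : pvInSpan l v) :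
    pvInSpan (y :: l) v := pv_span_cons.mpr (Or.inl h)

theorem pv_span_bits {m : List Nat} {j : Nat} (h : ∀ r ∈ m, r.testBit j = false) {v : Nat}
    (hv : pvInSpan m v) : v.testBit j = false := by
  obtain ⟨c, hc⟩ := hv
  induction m generalizing c v with
  | nil => rw [pv_pick_nil] at hc; rw [← hc]; exact Nat.zero_testBit j
  | cons x xs ih =>
    match c with
    | [] => rw [← hc]; exact Nat.zero_testBit j
    | cb :: cs =>
      rw [← hc]
      show (((if cb then x else 0) ^^^ pvPick cs xs)).testBit j = false
      rw [Nat.testBit_xor, ih (fun y hy => h y (List.mem_cons_of_mem _ hy)) cs rfl]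
      cases cb
      · simp [Nat.zero_testBit]
      · simp [h x (List.mem_cons_self)]

theorem pv_span_reverse {l : List Nat} {v : Nat} : pvInSpan l.reverse v ↔ pvInSpan l v := by
  constructor
  · exact fun h => pv_span_of_forall_mem (fun x hx => pv_span_mem (List.mem_reverse.mp hx)) h
  · exact fun h => pv_span_of_forall_mem (fun x hx => pv_span_mem (List.mem_reverse.mpr hx)) h

-- ===== A-side invariant =====

theorem pv_lead_ne_zero {x i : Nat} (h : pvIsLead x i) : x ≠ 0 := by
  intro rfl; have := h.1; rw [Nat.zero_testBit] at this; exact absurd this (by simp)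

theorem pv_lead_unique {v i j : Nat} (h1 : pvIsLead v i) (h2 : pvIsLead v j) : i = j := by
  rcases Nat.lt_trichotomy i j with h | h | h
  · exact absurd h2.1 (by rw [h1.2 j h]; simp)
  · exact h
  · exact absurd h1.1 (by rw [h2.2 i h]; simp)

theorem pv_pick_lead : ∀ (bs : List Nat) (k : Nat) (c : List Bool),
    (∀ idx, idx < bs.length → bs.getD idx 0 = 0 ∨ pvIsLead (bs.getD idx 0) (k + idx)) →
    pvPick c bs = 0 ∨
      ∃ j, pvIsLead (pvPick c bs) j ∧ k ≤ j ∧ j - k < bs.length ∧ bs.getD (j - k) 0 ≠ 0 := by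
  intro bs
  induction bs with
  | nil => intro k c _; left; rw [pv_pick_nil]
  | cons x rest ih =>
    intro k c hyp
    match c with
    | [] => left; rfl
    | cb :: cs =>
      have hyp' : ∀ idx, idx < rest.length → rest.getD idx 0 = 0 ∨ pvIsLead (rest.getD idx 0) ((k+1) + idx) := by
        intro idx hidx
        have h := hyp (idx+1) (by simp; omega)
        rw [List.getD_cons_succ] at h
        rw [show (k+1+idx) = k + (idx+1) by omega]
        exact h
      have hq := ih (k+1) cs hyp'
      have hshift : ∀ j, k + 1 ≤ j → j - (k+1) < rest.length → rest.getD (j - (k+1)) 0 ≠ 0 →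
          j - k < (x :: rest).length ∧ (x :: rest).getD (j - k) 0 ≠ 0 := by
        intro j hj hlt hne
        have h1 : j - k = (j - (k+1)) + 1 := by omega
        constructor
        · simp only [List.length_cons, h1]; omega
        · rw [h1, List.getD_cons_succ]; exact hne
      by_cases hcb : cb = true
      case neg =>
        have hpq : pvPick (cb :: cs) (x :: rest) = pvPick cs rest := by
          simp [pvPick, hcb]
        rw [hpq]
        rcases hq with h0 | ⟨j, hlead, hkj, hlt, hne⟩
        · left; exact h0
        · right; exact ⟨j, hlead, by omega, (hshift j hkj hlt hne).1, (hshift j hkj hlt hne).2⟩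
      case pos =>
        subst hcb
        have hpq : pvPick (true :: cs) (x :: rest) = x ^^^ pvPick cs rest := by
          simp [pvPick]
        rw [hpq]
        have hx := hyp 0 (by simp)
        simp only [Nat.add_zero, List.getD_cons_zero] at hx
        rcases hx with hx0 | hxl
        · rw [show x ^^^ pvPick cs rest = pvPick cs rest by rw [hx0, Nat.zero_xor]]
          rcases hq with h0 | ⟨j, hlead, hkj, hlt, hne⟩
          · left; exact h0
          · right; exact ⟨j, hlead, by omega, (hshift j hkj hlt hne).1, (hshift j hkj hlt hne).2⟩
        · rcases hq with h0 | ⟨j, hlead, hkj, hlt, hne⟩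
          · rw [h0, Nat.xor_zero]
            right
            refine ⟨k, hxl, Nat.le_refl k, by simp, ?_⟩
            rw [Nat.sub_self, List.getD_cons_zero]
            exact pv_lead_ne_zero hxl
          · right
            refine ⟨j, ?_, by omega, (hshift j hkj hlt hne).1, (hshift j hkj hlt hne).2⟩
            constructor
            · rw [Nat.testBit_xor, hxl.2 j (by omega), hlead.1]; rfl
            · intro t ht
              rw [Nat.testBit_xor, hxl.2 t (by omega), hlead.2 t ht]; rfl

theorem pv_getD_set_self (l : List Int) {i : Nat} (h : i < l.length) (v : Int) :
    (l.set i v).getD i 0 = v := by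
  rw [List.getD_eq_getElem _ _ (by simpa using h)]
  exact List.getElem_set_self _

theorem pv_getD_set_ne (l : List Int) {i j : Nat} (h : i ≠ j) (v : Int) :
    (l.set i v).getD j 0 = l.getD j 0 := by
  by_cases hj : j < l.length
  · rw [List.getD_eq_getElem _ _ (by simpa using hj), List.getD_eq_getElem _ _ hj]
    exact List.getElem_set_ne h _
  · rw [List.getD_eq_default _ _ (by simpa using Nat.le_of_not_lt hj),
        List.getD_eq_default _ _ (Nat.le_of_not_lt hj)]

theorem pv_getD_map_mu (l : List Int) {i : Nat} (h : i < l.length) :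
    (l.map pvMu).getD i 0 = pvMu (l.getD i 0) := by
  rw [List.getD_eq_getElem _ _ (by simpa using h), List.getD_eq_getElem _ _ h]
  exact List.getElem_map _

theorem pv_mu_mem_map (l : List Int) {i : Nat} (h : i < l.length) :
    pvMu (l.getD i 0) ∈ l.map pvMu := by
  rw [List.getD_eq_getElem _ _ h]
  have heq : pvMu l[i] = (l.map pvMu)[i]'(by simpa using h) := (List.getElem_map _).symm
  rw [heq]
  exact List.getElem_mem _

theorem pv_innerA_inv : ∀ (fuel : Nat), fuel ≤ 30 → ∀ (basis : List Int) (cur : Int) (L : List Nat),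
    basis.length = 30 →
    (∀ i, i < 30 → basis.getD i 0 = 0 ∨ pvIsLead (pvMu (basis.getD i 0)) i) →
    (∀ i, i < 30 → basis.getD i 0 ≠ 0 → pvInSpan L (pvMu (basis.getD i 0))) →
    (∀ v, pvInSpan L v → pvInSpan (pvMu cur :: basis.map pvMu) v) →
    (∀ j, fuel ≤ j → (pvMu cur).testBit j = false) →
    pvInSpan L (pvMu cur) →
    (pvInnerA basis cur fuel).length = 30 ∧
    (∀ i, i < 30 → (pvInnerA basis cur fuel).getD i 0 = 0 ∨
        pvIsLead (pvMu ((pvInnerA basis cur fuel).getD i 0)) i) ∧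
    (∀ i, i < 30 → (pvInnerA basis cur fuel).getD i 0 ≠ 0 →
        pvInSpan L (pvMu ((pvInnerA basis cur fuel).getD i 0))) ∧
    (∀ v, pvInSpan L v → pvInSpan ((pvInnerA basis cur fuel).map pvMu) v) := by
  intro fuel
  induction fuel with
  | zero =>
    intro _ basis cur L hlen hI1 hI2 hI3 hbits _
    have hcur0 : pvMu cur = 0 :=
      Nat.eq_of_testBit_eq fun j => by rw [hbits j (Nat.zero_le j), Nat.zero_testBit]
    refine ⟨hlen, hI1, hI2, ?_⟩
    intro v hv
    have := hI3 v hv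
    rw [hcur0] at this
    rcases pv_span_cons.mp this with h | h
    · exact h
    · rwa [Nat.xor_zero] at h
  | succ i ih =>
    intro hle basis cur L hlen hI1 hI2 hI3 hbits hcur
    have hi30 : i < 30 := by omega
    rw [show pvInnerA basis cur (i+1) = (if PySem.Int.band cur ((1:Int) <<< i) = 0 then pvInnerA basis cur i
      else if basis.getD i 0 = 0 then basis.set i cur
      else pvInnerA basis (PySem.Int.bxor cur (basis.getD i 0)) i) from rfl]
    by_cases hband : PySem.Int.band cur ((1:Int) <<< i) = 0
    · rw [if_pos hband]
      have hbit : (pvMu cur).testBit i = false := by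
        rw [pv_mu_testBit, (pv_guard_A cur i).mp hband]; rfl
      refine ih (by omega) basis cur L hlen hI1 hI2 hI3 ?_ hcur
      intro j hj
      rcases Nat.eq_or_lt_of_le hj with rfl | hj'
      · exact hbit
      · exact hbits j hj'
    · rw [if_neg hband]
      have hbit : (pvMu cur).testBit i = true := by
        rw [pv_mu_testBit]
        rcases Bool.eq_false_or_eq_true (cur.testBit i) with h | h
        · simp [h, hi30]
        · exact absurd ((pv_guard_A cur i).mpr h) hband
      by_cases hz : basis.getD i 0 = 0
      · rw [if_pos hz]
        have hleni : i < basis.length := by omega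
        have hlead : pvIsLead (pvMu cur) i := ⟨hbit, fun t ht => hbits t ht⟩
        refine ⟨by simpa using hlen, ?_, ?_, ?_⟩
        · intro j hj
          rcases eq_or_ne i j with rfl | hne
          · rw [pv_getD_set_self basis hleni]; right; exact hlead
          · rw [pv_getD_set_ne basis hne]; exact hI1 j hj
        · intro j hj
          rcases eq_or_ne i j with rfl | hne
          · rw [pv_getD_set_self basis hleni]; intro _; exact hcur
          · rw [pv_getD_set_ne basis hne]; exact hI2 j hj
        · intro v hv
          refine pv_span_of_forall_mem ?_ (hI3 v hv)
          intro y hy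
          rcases List.mem_cons.mp hy with rfl | hy'
          · -- y = pvMu cur, lives at slot i of the new basis
            apply pv_span_mem
            have hmem := pv_mu_mem_map (basis.set i cur) (i := i) (by simpa using hleni)
            rwa [pv_getD_set_self basis hleni cur] at hmem
          · obtain ⟨z, hz', rfl⟩ := List.mem_map.mp hy'
            obtain ⟨idx, hidx, rfl⟩ := List.mem_iff_getElem.mp hz'
            rcases eq_or_ne idx i with rfl | hne
            · rw [← List.getD_eq_getElem _ _ hidx, hz, pv_mu_zero]
              exact pv_span_zero _
            · apply pv_span_mem
              have hmem := pv_mu_mem_map (basis.set i cur) (i := idx) (by simpa using hidx)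
              rw [pv_getD_set_ne basis (Ne.symm hne), List.getD_eq_getElem _ _ hidx] at hmem
              exact hmem
      · rw [if_neg hz]
        have hleadb : pvIsLead (pvMu (basis.getD i 0)) i := (hI1 i hi30).resolve_left hz
        have hxor : pvMu (PySem.Int.bxor cur (basis.getD i 0)) = pvMu cur ^^^ pvMu (basis.getD i 0) :=
          pv_mu_xor _ _
        have hbmem : pvMu (basis.getD i 0) ∈ basis.map pvMu := pv_mu_mem_map basis (by omega)
        refine ih (by omega) basis _ L hlen hI1 hI2 ?_ ?_ ?_
        · intro v hv
          refine pv_span_of_forall_mem ?_ (hI3 v hv)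
          intro y hy
          rcases List.mem_cons.mp hy with rfl | hy'
          · -- pvMu cur = pvMu cur' ^^^ pvMu basis[i]
            have : pvMu cur = pvMu (PySem.Int.bxor cur (basis.getD i 0)) ^^^ pvMu (basis.getD i 0) := by
              rw [hxor, Nat.xor_assoc, Nat.xor_self, Nat.xor_zero]
            rw [this]
            exact pv_span_xor (pv_span_mem List.mem_cons_self)
              (pv_span_extend (pv_span_mem hbmem))
          · exact pv_span_extend (pv_span_mem hy')
        · intro j hj
          rw [hxor, Nat.testBit_xor]
          rcases Nat.eq_or_lt_of_le hj with rfl | hj'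
          · rw [hbit, hleadb.1]; rfl
          · rw [hbits j hj', hleadb.2 j hj']; rfl
        · rw [hxor]
          exact pv_span_xor hcur (hI2 i hi30 hz)

theorem pv_foldA_inv : ∀ (xs : List Int) (basis : List Int) (L : List Nat),
    basis.length = 30 →
    (∀ i, i < 30 → basis.getD i 0 = 0 ∨ pvIsLead (pvMu (basis.getD i 0)) i) →
    (∀ i, i < 30 → basis.getD i 0 ≠ 0 → pvInSpan L (pvMu (basis.getD i 0))) →
    (∀ v, pvInSpan L v → pvInSpan (basis.map pvMu) v) →
    (xs.foldl (fun b x => pvInnerA b x 30) basis).length = 30 ∧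
    (∀ i, i < 30 → (xs.foldl (fun b x => pvInnerA b x 30) basis).getD i 0 = 0 ∨
        pvIsLead (pvMu ((xs.foldl (fun b x => pvInnerA b x 30) basis).getD i 0)) i) ∧
    (∀ i, i < 30 → (xs.foldl (fun b x => pvInnerA b x 30) basis).getD i 0 ≠ 0 →
        pvInSpan ((xs.map pvMu).reverse ++ L)
          (pvMu ((xs.foldl (fun b x => pvInnerA b x 30) basis).getD i 0))) ∧
    (∀ v, pvInSpan ((xs.map pvMu).reverse ++ L) v →
        pvInSpan ((xs.foldl (fun b x => pvInnerA b x 30) basis).map pvMu) v) := by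
  intro xs
  induction xs with
  | nil =>
    intro basis L hlen hI1 hI2 hI3
    simpa using ⟨hlen, hI1, hI2, hI3⟩
  | cons x xs' ih =>
    intro basis L hlen hI1 hI2 hI3
    have hstep := pv_innerA_inv 30 (Nat.le_refl 30) basis x (pvMu x :: L) hlen hI1
      (fun i hi hne => pv_span_extend (hI2 i hi hne))
      (by
        intro v hv
        rcases pv_span_cons.mp hv with h | h
        · exact pv_span_extend (hI3 v h)
        · have hb := pv_span_extend (y := pvMu x) (hI3 _ h)
          have := pv_span_xor hb (pv_span_mem (List.mem_cons_self))
          rwa [Nat.xor_assoc, Nat.xor_self, Nat.xor_zero] at this)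
      (fun j hj => pv_mu_high x j hj)
      (pv_span_mem List.mem_cons_self)
    obtain ⟨hlen', hI1', hI2', hI3'⟩ := hstep
    have hres := ih (pvInnerA basis x 30) (pvMu x :: L) hlen' hI1' hI2' hI3'
    have hL : (xs'.map pvMu).reverse ++ (pvMu x :: L) = ((x :: xs').map pvMu).reverse ++ L := by
      simp
    rw [hL] at hres
    simpa using hres

theorem pv_A_char (basis : List Int) (L : List Nat)
    (hlen : basis.length = 30)
    (hI1 : ∀ i, i < 30 → basis.getD i 0 = 0 ∨ pvIsLead (pvMu (basis.getD i 0)) i)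
    (hI2 : ∀ i, i < 30 → basis.getD i 0 ≠ 0 → pvInSpan L (pvMu (basis.getD i 0)))
    (hI3 : ∀ v, pvInSpan L v → pvInSpan (basis.map pvMu) v)
    (i : Nat) (hi : i < 30) :
    basis.getD i 0 ≠ 0 ↔ pvPivot L i := by
  constructor
  · intro hne
    exact ⟨pvMu (basis.getD i 0), hI2 i hi hne, (hI1 i hi).resolve_left hne⟩
  · rintro ⟨v, hv, hlead⟩
    by_contra h0
    have h0' : basis.getD i 0 = 0 := h0
    obtain ⟨c, hc⟩ := hI3 v hv
    have hyp : ∀ idx, idx < (basis.map pvMu).length →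
        (basis.map pvMu).getD idx 0 = 0 ∨ pvIsLead ((basis.map pvMu).getD idx 0) (0 + idx) := by
      intro idx hidx
      rw [List.length_map] at hidx
      rw [pv_getD_map_mu basis hidx, Nat.zero_add]
      rcases hI1 idx (by omega) with h | h
      · left; rw [h, pv_mu_zero]
      · right; exact h
    rcases pv_pick_lead (basis.map pvMu) 0 c hyp with hz | ⟨j, hjl, _, hjlt, hjne⟩
    · rw [hc] at hz
      exact pv_lead_ne_zero hlead hz
    · rw [hc] at hjl
      have := pv_lead_unique hjl hlead
      subst this
      rw [Nat.sub_zero] at hjne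
      apply hjne
      rw [pv_getD_map_mu basis (by rw [List.length_map] at hjlt; simpa using hjlt), h0', pv_mu_zero]

-- ===== B-side =====

def pvNatFind : List Nat → Nat → Nat
  | [], _ => 0
  | r :: rest, i => if r.testBit i then r else pvNatFind rest i

def pvNatElim : List Nat → List Bool → Nat → List Nat × List Bool
  | rows, pivot, 0 => (rows, pivot)
  | rows, pivot, i+1 =>
    let p := pvNatFind rows i
    if p ≠ 0 then
      pvNatElim (rows.map fun r => if r.testBit i then r ^^^ p else r) (pivot.set i true) i
    else pvNatElim rows pivot i

theorem pv_getD_set_self' {α : Type} (l : List α) {i : Nat} (h : i < l.length) (v d : α) :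
    (l.set i v).getD i d = v := by
  rw [List.getD_eq_getElem _ _ (by simpa using h)]
  exact List.getElem_set_self _

theorem pv_getD_set_ne' {α : Type} (l : List α) {i j : Nat} (h : i ≠ j) (v d : α) :
    (l.set i v).getD j d = l.getD j d := by
  by_cases hj : j < l.length
  · rw [List.getD_eq_getElem _ _ (by simpa using hj), List.getD_eq_getElem _ _ hj]
    exact List.getElem_set_ne h _
  · rw [List.getD_eq_default _ _ (by simpa using Nat.le_of_not_lt hj),
        List.getD_eq_default _ _ (Nat.le_of_not_lt hj)]

theorem pv_pick_nil' (l : List Nat) : pvPick [] l = 0 := by cases l <;> rfl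

theorem pv_find_spec (rows : List Nat) (i : Nat) :
    (pvNatFind rows i = 0 ∧ ∀ r ∈ rows, r.testBit i = false) ∨
    (pvNatFind rows i ∈ rows ∧ (pvNatFind rows i).testBit i = true) := by
  induction rows with
  | nil => left; exact ⟨rfl, by simp⟩
  | cons r rest ih =>
    have hstep : pvNatFind (r :: rest) i = if r.testBit i then r else pvNatFind rest i := rfl
    rw [hstep]
    by_cases h : r.testBit i = true
    · right
      rw [if_pos h]
      exact ⟨List.mem_cons_self, h⟩

    · rw [if_neg h]
      rcases ih with ⟨h0, hall⟩ | ⟨hmem, hbit⟩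
      · left
        refine ⟨h0, ?_⟩
        intro r' hr'
        rcases List.mem_cons.mp hr' with rfl | hr''
        · simpa using h
        · exact hall r' hr''
      · right
        exact ⟨List.mem_cons_of_mem _ hmem, hbit⟩

theorem pv_pick_map (p : Nat) (i : Nat) (rows : List Nat) :
    ∀ c, ∃ b : Bool, pvPick c (rows.map fun r => if r.testBit i then r ^^^ p else r) =
      pvPick c rows ^^^ (if b then p else 0) := by
  induction rows with
  | nil => intro c; exact ⟨false, by simp [pv_pick_nil]⟩
  | cons r rest ih =>
    intro c
    match c with
    | [] => exact ⟨false, by simp [pv_pick_nil']⟩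
    | cb :: cs =>
      obtain ⟨b', hb'⟩ := ih cs
      have hL : pvPick (cb :: cs) ((r :: rest).map fun r => if r.testBit i then r ^^^ p else r) =
          (if cb then (if r.testBit i then r ^^^ p else r) else 0) ^^^
            pvPick cs (rest.map fun r => if r.testBit i then r ^^^ p else r) := rfl
      have hR : pvPick (cb :: cs) (r :: rest) = (if cb then r else 0) ^^^ pvPick cs rest := rfl
      rw [hL, hR, hb']
      by_cases hcb : cb = true
      · subst hcb
        by_cases hbit : r.testBit i = true
        · refine ⟨!b', ?_⟩
          rw [if_pos rfl, if_pos rfl, if_pos hbit]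
          cases b' <;> simp [Nat.xor_comm, Nat.xor_left_comm, Nat.xor_assoc]
        · refine ⟨b', ?_⟩
          rw [if_pos rfl, if_pos rfl, if_neg hbit]
          cases b' <;> simp [Nat.xor_comm, Nat.xor_left_comm, Nat.xor_assoc]
      · refine ⟨b', ?_⟩
        rw [if_neg hcb, if_neg hcb]
        cases b' <;> simp [Nat.xor_comm, Nat.xor_left_comm, Nat.xor_assoc]

theorem pv_elim_inv : ∀ (fuel : Nat), fuel ≤ 30 → ∀ (rows : List Nat) (pivot : List Bool) (L : List Nat),
    (∀ r ∈ rows, (∀ j, fuel ≤ j → r.testBit j = false) ∧ pvInSpan L r) →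
    (∀ v, pvInSpan L v → (∀ j, fuel ≤ j → v.testBit j = false) → pvInSpan rows v) →
    pivot.length = 30 →
    (∀ j, j < 30 → ((pivot.getD j false = true) ↔ (fuel ≤ j ∧ pvPivot L j))) →
    ∀ j, j < 30 → (((pvNatElim rows pivot fuel).2.getD j false = true) ↔ pvPivot L j) := by
  intro fuel
  induction fuel with
  | zero =>
    intro _ rows pivot L _ _ _ hpiv j hj
    have h0 : pvNatElim rows pivot 0 = (rows, pivot) := rfl
    rw [h0, hpiv j hj]
    simp
  | succ i ih =>
    intro hle rows pivot L hr hk hlen hpiv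
    have hi30 : i < 30 := by omega
    have hstep : pvNatElim rows pivot (i+1) =
        (if pvNatFind rows i ≠ 0 then
          pvNatElim (rows.map fun r => if r.testBit i then r ^^^ pvNatFind rows i else r)
            (pivot.set i true) i
        else pvNatElim rows pivot i) := rfl
    rw [hstep]
    by_cases hp : pvNatFind rows i ≠ 0
    · rw [if_pos hp]
      rcases pv_find_spec rows i with ⟨h0, _⟩ | ⟨hmem, hbit⟩
      · exact absurd h0 hp
      set p := pvNatFind rows i with hpdef
      have hrows' : ∀ r' ∈ (rows.map fun r => if r.testBit i then r ^^^ p else r),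
          (∀ j, i ≤ j → r'.testBit j = false) ∧ pvInSpan L r' := by
        intro r' hr'
        obtain ⟨r, hrmem, rfl⟩ := List.mem_map.mp hr'
        by_cases hb : r.testBit i = true
        · rw [if_pos hb]
          refine ⟨?_, pv_span_xor (hr r hrmem).2 (hr p hmem).2⟩
          intro j hj
          rcases Nat.eq_or_lt_of_le hj with rfl | hj'
          · rw [Nat.testBit_xor, hb, hbit]; rfl
          · rw [Nat.testBit_xor, (hr r hrmem).1 j hj', (hr p hmem).1 j hj']; rfl
        · rw [if_neg hb]
          refine ⟨?_, (hr r hrmem).2⟩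
          intro j hj
          rcases Nat.eq_or_lt_of_le hj with rfl | hj'
          · simpa using hb
          · exact (hr r hrmem).1 j hj'
      refine ih (by omega) _ _ L hrows' ?_ (by simpa using hlen) ?_
      · -- span restriction carries over to the eliminated rows
        intro v hv hbv
        obtain ⟨c, hc⟩ := hk v hv (fun j hj => hbv j (by omega))
        obtain ⟨b, hb⟩ := pv_pick_map p i rows c
        rw [hc] at hb
        cases b
        · rw [if_neg (by simp), Nat.xor_zero] at hb
          exact ⟨c, hb⟩
        · exfalso
          have hL : (pvPick c (rows.map fun r => if r.testBit i then r ^^^ p else r)).testBit i = false :=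
            pv_span_bits (fun r' hr' => (hrows' r' hr').1 i (Nat.le_refl i)) ⟨c, rfl⟩
          rw [hb, if_pos rfl, Nat.testBit_xor, hbv i (Nat.le_refl i), hbit] at hL
          simp at hL
      · intro j hj
        rcases eq_or_ne i j with rfl | hne
        · rw [pv_getD_set_self' pivot (by omega) true false]
          have hPi : pvPivot L i :=
            ⟨p, (hr p hmem).2, hbit, fun t ht => (hr p hmem).1 t ht⟩
          simp [hPi]
        · rw [pv_getD_set_ne' pivot hne true false, hpiv j hj]
          constructor
          · rintro ⟨h1, h2⟩; exact ⟨by omega, h2⟩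
          · rintro ⟨h1, h2⟩; exact ⟨by omega, h2⟩
    · rw [if_neg hp]
      have hp0 : pvNatFind rows i = 0 := by by_contra h; exact hp h
      rcases pv_find_spec rows i with ⟨_, hall⟩ | ⟨_, hbit⟩
      swap
      · rw [hp0] at hbit; rw [Nat.zero_testBit] at hbit; exact absurd hbit (by simp)
      have hnoPi : ¬ pvPivot L i := by
        rintro ⟨v, hv, hlead⟩
        have hvr : pvInSpan rows v := hk v hv (fun j hj => hlead.2 j (by omega))
        have := pv_span_bits hall hvr
        rw [hlead.1] at this
        exact absurd this (by simp)
      refine ih (by omega) rows pivot L ?_ ?_ hlen ?_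
      · intro r hrm
        refine ⟨?_, (hr r hrm).2⟩
        intro j hj
        rcases Nat.eq_or_lt_of_le hj with rfl | hj'
        · exact hall r hrm
        · exact (hr r hrm).1 j hj'
      · intro v hv hbv
        exact hk v hv (fun j hj => hbv j (by omega))
      · intro j hj
        rw [hpiv j hj]
        rcases eq_or_ne i j with rfl | hne
        · simp [hnoPi]
        · constructor
          · rintro ⟨h1, h2⟩; exact ⟨by omega, h2⟩
          · rintro ⟨h1, h2⟩; exact ⟨by omega, h2⟩


def pvCast (l : List Nat) : List Int := l.map (fun n : Nat => (n : Int))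

theorem pv_cast_cons (r : Nat) (rest : List Nat) : pvCast (r :: rest) = (r : Int) :: pvCast rest := rfl

theorem pv_sim_find (l : List Nat) (i : Nat) :
    pvFindB (pvCast l) i = ((pvNatFind l i : Nat) : Int) := by
  induction l with
  | nil => rfl
  | cons r rest ih =>
    rw [pv_cast_cons]
    have hstepI : pvFindB ((r : Int) :: pvCast rest) i =
        (if PySem.Int.band ((r : Int) >>> i) 1 ≠ 0 then (r : Int) else pvFindB (pvCast rest) i) := rfl
    have hstepN : pvNatFind (r :: rest) i = (if r.testBit i then r else pvNatFind rest i) := rfl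
    rw [hstepI, hstepN]
    by_cases hb : r.testBit i = true
    · rw [if_pos (by rw [Ne, pv_guard_B]; simp [hb]), if_pos hb]
    · rw [if_neg (by rw [Ne, pv_guard_B]; simp [hb]), if_neg hb]
      exact ih

theorem pv_sim_elim (fuel : Nat) : ∀ (l : List Nat) (pivot : List Bool),
    pvElimB (pvCast l) pivot fuel =
      (pvCast (pvNatElim l pivot fuel).1, (pvNatElim l pivot fuel).2) := by
  induction fuel with
  | zero => intro l pivot; rfl
  | succ i ih =>
    intro l pivot
    have hstepI : pvElimB (pvCast l) pivot (i+1) =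
        (if pvFindB (pvCast l) i ≠ 0 then
          pvElimB ((pvCast l).map fun (r : Int) =>
              if PySem.Int.band (r >>> i) 1 ≠ 0 then PySem.Int.bxor r (pvFindB (pvCast l) i) else r)
            (pivot.set i true) i
        else pvElimB (pvCast l) pivot i) := rfl
    have hstepN : pvNatElim l pivot (i+1) =
        (if pvNatFind l i ≠ 0 then
          pvNatElim (l.map fun r => if r.testBit i then r ^^^ pvNatFind l i else r) (pivot.set i true) i
        else pvNatElim l pivot i) := rfl
    rw [hstepI, hstepN, pv_sim_find]
    by_cases hp : pvNatFind l i = 0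
    · rw [if_neg (by simp [hp]), if_neg (by simp [hp])]
      exact ih l pivot
    · rw [if_pos (by simp [hp]), if_pos hp]
      have hmap : ((pvCast l).map fun (r : Int) =>
          if PySem.Int.band (r >>> i) 1 ≠ 0 then PySem.Int.bxor r ((pvNatFind l i : Nat) : Int) else r) =
          pvCast (l.map fun r => if r.testBit i then r ^^^ pvNatFind l i else r) := by
        unfold pvCast
        rw [List.map_map, List.map_map]
        apply List.map_congr_left
        intro r _
        simp only [Function.comp]
        by_cases hb : r.testBit i = true
        · rw [if_pos (by rw [Ne, pv_guard_B]; simp [hb]), if_pos hb]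
          exact PySem.Int.bxor_natCast r (pvNatFind l i)
        · rw [if_neg (by rw [Ne, pv_guard_B]; simp [hb]), if_neg hb]
      rw [hmap]
      exact ih _ _

theorem pv_scan_eq : ∀ (fuel i : Nat) (basis : List Int) (pivot : List Bool),
    i + fuel = 30 →
    (∀ j, i ≤ j → j < 30 → (basis.getD j 0 = 0 ↔ pivot.getD j false = false)) →
    pvScanA basis i fuel = pvScanB pivot i fuel := by
  intro fuel
  induction fuel with
  | zero => intro i basis pivot _ _; rfl
  | succ f ih =>
    intro i basis pivot hif hiff
    have hi : i < 30 := by omega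
    have hA : pvScanA basis i (f+1) =
        (if basis.getD i 0 = 0 then (1:Int) <<< i else pvScanA basis (i+1) f) := rfl
    have hB : pvScanB pivot i (f+1) =
        (if pivot.getD i false = false then (1:Int) <<< i else pvScanB pivot (i+1) f) := rfl
    rw [hA, hB]
    by_cases hz : basis.getD i 0 = 0
    · rw [if_pos hz, if_pos ((hiff i (Nat.le_refl i) hi).mp hz)]
    · rw [if_neg hz, if_neg (fun hf => hz ((hiff i (Nat.le_refl i) hi).mpr hf))]
      exact ih (i+1) basis pivot (by omega) (fun j h1 h2 => hiff j (by omega) h2)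

theorem pv_pivot_reverse (l : List Nat) (j : Nat) : pvPivot l.reverse j ↔ pvPivot l j := by
  unfold pvPivot
  constructor
  · rintro ⟨v, hv, hl⟩; exact ⟨v, pv_span_reverse.mp hv, hl⟩
  · rintro ⟨v, hv, hl⟩; exact ⟨v, pv_span_reverse.mpr hv, hl⟩

theorem pv_main (a : List Int) : bit009_smallest_absent_xor a = bit009_smallest_absent_xor_alt a := by
  have halt : bit009_smallest_absent_xor_alt a =
      pvScanB (pvElimB (a.map (fun x => PySem.Int.band x (((1:Int) <<< (30:Nat)) - 1)))
        (List.replicate 30 false) 30).2 0 30 := rfl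
  rw [halt]
  unfold bit009_smallest_absent_xor
  have hrows : a.map (fun x => PySem.Int.band x (((1:Int) <<< (30:Nat)) - 1)) =
      pvCast (a.map pvMu) := by
    unfold pvCast
    rw [List.map_map]
    apply List.map_congr_left
    intro x _
    exact pv_mask_eq x
  rw [hrows, pv_sim_elim]
  -- A-side invariant
  have hinit3 : ∀ v, pvInSpan ([] : List Nat) v → pvInSpan ((List.replicate 30 (0:Int)).map pvMu) v := by
    rintro v ⟨c, hc⟩
    rw [pv_pick_nil] at hc
    exact hc ▸ pv_span_zero _
  obtain ⟨hlenF, hI1F, hI2F, hI3F⟩ := pv_foldA_inv a (List.replicate 30 (0:Int)) []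
    (by simp)
    (by intro i hi; left; exact List.getD_replicate _ (by omega))
    (by intro i hi hne; exact absurd (List.getD_replicate _ (by omega)) hne)
    hinit3
  rw [List.append_nil] at hI2F hI3F
  -- B-side invariant
  have hBpiv := pv_elim_inv 30 (Nat.le_refl 30) (a.map pvMu) (List.replicate 30 false) (a.map pvMu)
    (by
      intro r hr
      obtain ⟨x, _, rfl⟩ := List.mem_map.mp hr
      exact ⟨fun j hj => pv_mu_high x j hj, pv_span_mem hr⟩)
    (fun v hv _ => hv)
    (by simp)
    (by
      intro j hj
      rw [List.getD_replicate _ (by omega)]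
      constructor
      · intro h; exact absurd h (by simp)
      · rintro ⟨h, _⟩; omega)
  -- glue
  apply pv_scan_eq 30 0 _ _ (by omega)
  intro j _ hj
  have hA := pv_A_char _ ((a.map pvMu).reverse) hlenF hI1F hI2F hI3F j hj
  have hB := hBpiv j hj
  rw [pv_pivot_reverse] at hA
  constructor
  · intro h0
    have : ¬ pvPivot (a.map pvMu) j := fun hp => (hA.mpr hp) h0
    cases hq : ((pvNatElim (a.map pvMu) (List.replicate 30 false) 30).2.getD j false)
    · rfl
    · exact absurd (hB.mp hq) this
  · intro hf
    by_contra hne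
    have hp := hA.mp hne
    rw [← hB] at hp
    rw [hf] at hp
    exact absurd hp (by simp)

-- ===== VERDICT (by name: the statement is the Claim_ definition above) =====
theorem bit009_smallest_absent_xor_spec : Claim_equal_bit009_smallest_absent_xor := by
  intro a _
  show bit009_smallest_absent_xor a = bit009_smallest_absent_xor_alt a
  exact pv_main a
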